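-- pv_equiv track=rewrite | github.com/kmb5/advent_of_code_2020 | day6.py | part2
-- ===== SOURCE A (Python) =====
-- def part2(data: str) -> int:
--     """Objective: Count the letters
--     which appear in all rows
--
--     (I hate this code but this is what
--     I could come up with)
--
--     Parameters
--     ----------
--     data : str
--         The raw puzzle input
--
--     Returns
--     -------
--     sum : int
--         The sum of all letters which appear
--         in all rows of a group
--
--     """
--
--     # test data:
--     # data = '''abc\n\na\nb\nc\n\nab\nac\n\na\na\na\na\n\nb'''
--     all_pts = []
--
--     split = data.split('\n\n')
--     groups = [x.split('\n') for x in split]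
--
--     for row in groups:
--
--         first_row = row[0]
--         pts = 0
--
--         if len(row) == 1:
--             # If there is only one row
--             # for the group, all letters
--             # appear in all rows,
--             # so we have as many unique letters
--             # as there are letters in the row
--
--             all_pts.append(len(row[0]))
--             continue
--
--         for letter in first_row:
--
--             # For each letter in the first row,
--             # check if it is in all the following rows
--
--             letter_in_how_many_rows = 0
--
--             for row_to_check in row[1:]:
--
--                 if letter in row_to_check:
--                     # the letter is in the following row
--                     letter_in_how_many_rows += 1
--
--             if letter_in_how_many_rows == len(row[1:]):
--                 # The letter is in ALL following rows
--                 pts += 1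
--
--         all_pts.append(pts)
--
--     return sum(all_pts)
-- ===== SOURCE B (Python) =====
-- def part2(data: str) -> int:
--     total = 0
--     for group in data.split('\n\n'):
--         rows = group.split('\n')
--         if len(rows) == 1:
--             total += len(rows[0])
--         else:
--             inter = set(rows[1])
--             for r in rows[2:]:
--                 inter &= set(r)
--             total += sum(1 for c in rows[0] if c in inter)
--     return total
-- ===== Notes on version B (the rewrite author's own statement) =====
-- stated objective: alternative
-- what changed: Per group, B builds the intersection of the letter-sets of all rows after the first once and then makes a single counting pass over the first row, instead of A's per-letter rescan of every following row with a count-vs-length test.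
import Mathlib
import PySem

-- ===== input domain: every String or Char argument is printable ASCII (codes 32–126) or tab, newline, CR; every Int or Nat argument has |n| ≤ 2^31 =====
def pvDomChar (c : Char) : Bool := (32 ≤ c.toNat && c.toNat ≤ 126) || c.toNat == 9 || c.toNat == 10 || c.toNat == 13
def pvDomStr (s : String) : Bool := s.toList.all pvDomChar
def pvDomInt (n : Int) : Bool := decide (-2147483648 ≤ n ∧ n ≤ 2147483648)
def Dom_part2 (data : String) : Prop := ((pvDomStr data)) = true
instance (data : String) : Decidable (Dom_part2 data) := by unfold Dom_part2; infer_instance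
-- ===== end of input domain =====

-- B replaces A's per-letter rescan of all following rows by a shared-letter set built
-- once per group (intersection of the following rows' letter sets) and one counting
-- pass over the first row; objective: alternative decomposition.

-- ===== PORT A =====
def part2 (data : String) : Int :=
  let split := PySem.Chars.splitOn data.toList ['\n', '\n']
  let groups := split.map (fun x => PySem.Chars.splitOn x ['\n'])
  let all_pts := groups.foldl (fun all_pts row =>
    let first_row := PySem.List.pyGetD row 0 []
    if row.length = 1 then
      all_pts ++ [((PySem.List.pyGetD row 0 []).length : Int)]
    else
      let pts := first_row.foldl (fun pts letter =>
        let letter_in_how_many_rows := (PySem.List.slice row (some 1) none).foldl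
          (fun c row_to_check =>
            if PySem.Chars.isIn [letter] row_to_check then c + 1 else c) (0 : Int)
        if letter_in_how_many_rows = ((PySem.List.slice row (some 1) none).length : Int)
        then pts + 1 else pts) (0 : Int)
      all_pts ++ [pts]) ([] : List Int)
  all_pts.sum

-- ===== PORT B =====
def part2_alt (data : String) : Int :=
  (PySem.Chars.splitOn data.toList ['\n', '\n']).foldl (fun total group =>
    let rows := PySem.Chars.splitOn group ['\n']
    if rows.length = 1 then
      total + ((PySem.List.pyGetD rows 0 []).length : Int)
    else
      let inter := (PySem.List.slice rows (some 2) none).foldl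
        (fun s r => PySem.Set.inter s (PySem.Set.ofList r))
        (PySem.Set.ofList (PySem.List.pyGetD rows 1 []))
      total + (PySem.List.pyGetD rows 0 []).foldl
        (fun c ch => if PySem.Set.contains inter ch then c + 1 else c) (0 : Int)) 0

-- ===== PRECONDITION & SPEC =====
def Spec_part2 (data : String) (out : Int) : Prop := out = part2_alt data
instance (data : String) (out : Int) : Decidable (Spec_part2 data out) := by unfold Spec_part2; infer_instance

-- ===== CLAIM (what is proved, stated in full; the proofs are below) =====
def Claim_equal_part2 : Prop := ∀ (data : String), Dom_part2 data → Spec_part2 data (part2 data)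

-- ===== LEMMAS AND PROOFS =====

-- the value A contributes to all_pts for one group's row list
def rowValA (row : List (List Char)) : Int :=
  if row.length = 1 then
    ((PySem.List.pyGetD row 0 []).length : Int)
  else
    (PySem.List.pyGetD row 0 []).foldl (fun pts letter =>
      let letter_in_how_many_rows := (PySem.List.slice row (some 1) none).foldl
        (fun c row_to_check =>
          if PySem.Chars.isIn [letter] row_to_check then c + 1 else c) (0 : Int)
      if letter_in_how_many_rows = ((PySem.List.slice row (some 1) none).length : Int)
      then pts + 1 else pts) (0 : Int)

lemma part2_eq_sum_map (data : String) :
    part2 data = ((PySem.Chars.splitOn data.toList ['\n', '\n']).map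
      (fun g => rowValA (PySem.Chars.splitOn g ['\n']))).sum := by
  unfold part2
  rw [show (fun (all_pts : List Int) (row : List (List Char)) =>
        let first_row := PySem.List.pyGetD row 0 []
        if row.length = 1 then
          all_pts ++ [((PySem.List.pyGetD row 0 []).length : Int)]
        else
          let pts := first_row.foldl (fun pts letter =>
            let letter_in_how_many_rows := (PySem.List.slice row (some 1) none).foldl
              (fun c row_to_check =>
                if PySem.Chars.isIn [letter] row_to_check then c + 1 else c) (0 : Int)
            if letter_in_how_many_rows = ((PySem.List.slice row (some 1) none).length : Int)
            then pts + 1 else pts) (0 : Int)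
          all_pts ++ [pts]) =
      (fun all_pts row => all_pts ++ [rowValA row]) from by
        funext all_pts row
        simp only [rowValA]
        split_ifs <;> rfl]
  simp only [PySem.List.foldl_append_singleton_eq_map, List.nil_append, List.map_map]
  rfl

-- membership in the fold of intersections
lemma mem_foldl_inter (ls : List (List Char)) (s : PySem.Set Char) (x : Char) :
    x ∈ ls.foldl (fun s r => PySem.Set.inter s (PySem.Set.ofList r)) s ↔
      x ∈ s ∧ ∀ r ∈ ls, x ∈ r := by
  induction ls generalizing s with
  | nil => simp
  | cons r rs ih =>
    simp only [List.foldl_cons, ih, PySem.Set.mem_inter, PySem.Set.mem_ofList,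
      List.mem_cons]
    constructor
    · rintro ⟨⟨hs, hr⟩, hrest⟩
      exact ⟨hs, fun t ht => ht.elim (fun e => e ▸ hr) (hrest t)⟩
    · rintro ⟨hs, hall⟩
      exact ⟨⟨hs, hall r (Or.inl rfl)⟩, fun t ht => hall t (Or.inr ht)⟩

-- per-group equality of the contributed values
lemma rowVal_eq (rows : List (List Char)) :
    rowValA rows =
      (if rows.length = 1 then
        ((PySem.List.pyGetD rows 0 []).length : Int)
      else
        (PySem.List.pyGetD rows 0 []).foldl
          (fun c ch => if PySem.Set.contains
              ((PySem.List.slice rows (some 2) none).foldl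
                (fun s r => PySem.Set.inter s (PySem.Set.ofList r))
                (PySem.Set.ofList (PySem.List.pyGetD rows 1 []))) ch
            then c + 1 else c) (0 : Int)) := by
  unfold rowValA
  split_ifs with h1
  · rfl
  · -- both sides are counts over the first row; compare the predicates
    set inter := (PySem.List.slice rows (some 2) none).foldl
      (fun s r => PySem.Set.inter s (PySem.Set.ofList r))
      (PySem.Set.ofList (PySem.List.pyGetD rows 1 [])) with hinter
    have hA := PySem.List.foldl_count_if
      (fun letter => decide (((PySem.List.slice rows (some 1) none).foldl
        (fun c row_to_check =>
          if PySem.Chars.isIn [letter] row_to_check then c + 1 else c) (0 : Int)) =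
        ((PySem.List.slice rows (some 1) none).length : Int)))
      (PySem.List.pyGetD rows 0 []) 0
    have hB := PySem.List.foldl_count_if (fun ch => PySem.Set.contains inter ch)
      (PySem.List.pyGetD rows 0 []) 0
    simp only [decide_eq_true_eq] at hA
    rw [hA, hB]
    congr 1
    norm_cast
    apply List.countP_congr
    intro letter hm
    have hcnt : ((PySem.List.slice rows (some 1) none).foldl
        (fun c row_to_check =>
          if PySem.Chars.isIn [letter] row_to_check then c + 1 else c) (0 : Int)) =
        ((PySem.List.slice rows (some 1) none).countP
          (fun r => PySem.Chars.isIn [letter] r) : Int) := by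
      rw [PySem.List.foldl_count_if]; ring
    rcases rows with _ | ⟨r0, rows'⟩
    · exfalso
      have hnil : PySem.List.pyGetD ([] : List (List Char)) 0 [] = [] := rfl
      rw [hnil] at hm
      exact absurd hm (List.not_mem_nil)
    · rcases rows' with _ | ⟨r1, rs⟩
      · exact absurd rfl h1
      · have hs1 : PySem.List.slice (r0 :: r1 :: rs) (some 1) none = r1 :: rs := by
          simpa using PySem.List.slice_from_natCast (r0 :: r1 :: rs) 1
        have hs2 : PySem.List.slice (r0 :: r1 :: rs) (some 2) none = rs := by
          simpa using PySem.List.slice_from_natCast (r0 :: r1 :: rs) 2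
        have hg1 : PySem.List.pyGetD (r0 :: r1 :: rs) (1 : Int) ([] : List Char) = r1 := by
          rw [show (1 : Int) = ((1 : Nat) : Int) from rfl, PySem.List.pyGetD_natCast]; rfl
        rw [hcnt, hs1]
        have hmem : PySem.Set.contains inter letter = true ↔
            (letter ∈ r1 ∧ ∀ r ∈ rs, letter ∈ r) := by
          rw [hinter, hs2, hg1, PySem.Set.contains_iff, mem_foldl_inter,
            PySem.Set.mem_ofList]
        have hiff : (((r1 :: rs).countP (fun r => PySem.Chars.isIn [letter] r) : Int) =
            ((r1 :: rs).length : Int)) ↔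
            (letter ∈ r1 ∧ ∀ r ∈ rs, letter ∈ r) := by
          rw [Int.natCast_inj, List.countP_eq_length]
          constructor
          · intro h
            have h1' := h r1 (List.mem_cons_self ..)
            rw [PySem.Chars.isIn_iff_infix, List.singleton_infix_iff] at h1'
            refine ⟨h1', fun r hr => ?_⟩
            have := h r (List.mem_cons_of_mem _ hr)
            rwa [PySem.Chars.isIn_iff_infix, List.singleton_infix_iff] at this
          · rintro ⟨ha, hb⟩ r hr
            rw [PySem.Chars.isIn_iff_infix, List.singleton_infix_iff]
            rcases List.mem_cons.mp hr with rfl | hr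
            · exact ha
            · exact hb r hr
        by_cases hc : letter ∈ r1 ∧ ∀ r ∈ rs, letter ∈ r
        · rw [hmem.mpr hc, decide_eq_true (hiff.mpr hc)]
        · have : ¬ (((r1 :: rs).countP (fun r => PySem.Chars.isIn [letter] r) : Int) =
              ((r1 :: rs).length : Int)) := fun h => hc (hiff.mp h)
          simp only [decide_eq_false this]
          have : PySem.Set.contains inter letter = false := by
            cases hcon : PySem.Set.contains inter letter
            · rfl
            · exact absurd (hmem.mp hcon) hc
          rw [this]

lemma alt_eq_sum_map (gs : List (List Char)) (t : Int) :
    gs.foldl (fun total group =>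
      let rows := PySem.Chars.splitOn group ['\n']
      if rows.length = 1 then
        total + ((PySem.List.pyGetD rows 0 []).length : Int)
      else
        let inter := (PySem.List.slice rows (some 2) none).foldl
          (fun s r => PySem.Set.inter s (PySem.Set.ofList r))
          (PySem.Set.ofList (PySem.List.pyGetD rows 1 []))
        total + (PySem.List.pyGetD rows 0 []).foldl
          (fun c ch => if PySem.Set.contains inter ch then c + 1 else c) (0 : Int)) t =
    t + (gs.map (fun g => rowValA (PySem.Chars.splitOn g ['\n']))).sum := by
  induction gs generalizing t with
  | nil => simp
  | cons g gs ih =>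
    simp only [List.foldl_cons, List.map_cons, List.sum_cons, ih]
    rw [rowVal_eq (PySem.Chars.splitOn g ['\n'])]
    split_ifs <;> ring

-- ===== VERDICT (by name: the statement is the Claim_ definition above) =====
theorem part2_spec : Claim_equal_part2 := by
  intro data _
  unfold Spec_part2
  rw [part2_eq_sum_map]
  unfold part2_alt
  rw [alt_eq_sum_map]
  ring
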